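-- pv_equiv track=rewrite | github.com/agisota/diffs | docdiffops_mvp/docdiffops/forensic_correlations.py | compute_coverage_heatmap
-- ===== SOURCE A (Python) =====
-- from typing import Any
--
-- def compute_coverage_heatmap(
--     correlation_matrix: dict[str, dict[str, int]],
--     docs: list[dict[str, Any]],
-- ) -> dict[str, dict[int, int]]:
--     """Count coverage per theme broken down by document source rank.
--
--     For each theme the function counts how many documents with a given rank
--     have at least one coverage link (i.e. ``correlation_matrix[theme][doc] > 0``).
--     This reveals themes covered only by analytics (rank 3) without primary
--     regulation (ranks 1–2).
--
--     Args:
--         correlation_matrix: Output of :func:`compute_correlation_matrix`,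
--             ``{theme_id: {doc_id: count, ...}, ...}``.
--         docs: List of document dicts with at least ``"id"`` and ``"rank"``.
--             ``rank`` should be an integer or a string parseable as one.
--
--     Returns:
--         ``{theme_id: {1: n, 2: n, 3: n, 4: n}}``.  Only ranks 1–4 are
--         tracked; documents with other rank values are ignored.
--     """
--     if not correlation_matrix:
--         return {}
--
--     doc_rank: dict[str, int] = {}
--     for d in docs:
--         did = str(d.get("id", ""))
--         raw_rank = d.get("rank", "")
--         try:
--             doc_rank[did] = int(raw_rank)
--         except (ValueError, TypeError):
--             pass
--
--     heatmap: dict[str, dict[int, int]] = {}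
--     for tid, row in correlation_matrix.items():
--         rank_counts: dict[int, int] = {1: 0, 2: 0, 3: 0, 4: 0}
--         for did, cnt in row.items():
--             if cnt > 0:
--                 r = doc_rank.get(did)
--                 if r in rank_counts:
--                     rank_counts[r] += 1
--         heatmap[tid] = rank_counts
--     return heatmap
-- ===== SOURCE B (Python) =====
-- def compute_coverage_heatmap(correlation_matrix, docs):
--     """Count coverage per theme by document rank, driving the inner loop from
--     the documents side: doc ids are grouped by rank once, and each theme's
--     counts come from probing its row for the grouped ids."""
--     if not correlation_matrix:
--         return {}
--
--     doc_rank = {}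
--     for d in docs:
--         did = str(d.get("id", ""))
--         raw_rank = d.get("rank", "")
--         try:
--             doc_rank[did] = int(raw_rank)
--         except (ValueError, TypeError):
--             pass
--
--     rank_docs = {1: [], 2: [], 3: [], 4: []}
--     for did, r in doc_rank.items():
--         if r in rank_docs:
--             rank_docs[r].append(did)
--
--     heatmap = {}
--     for tid, row in correlation_matrix.items():
--         heatmap[tid] = {
--             r: sum(1 for did in ids if row.get(did, 0) > 0)
--             for r, ids in rank_docs.items()
--         }
--     return heatmap
-- ===== Notes on version B (the rewrite author's own statement) =====
-- stated objective: alternative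
-- what changed: B inverts the inner loop's traversal: instead of scanning each theme's correlation row and looking up every doc's rank, it groups doc ids by rank once up front and, per theme, counts by probing the theme's row for the ids in each rank bucket.
import Mathlib
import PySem

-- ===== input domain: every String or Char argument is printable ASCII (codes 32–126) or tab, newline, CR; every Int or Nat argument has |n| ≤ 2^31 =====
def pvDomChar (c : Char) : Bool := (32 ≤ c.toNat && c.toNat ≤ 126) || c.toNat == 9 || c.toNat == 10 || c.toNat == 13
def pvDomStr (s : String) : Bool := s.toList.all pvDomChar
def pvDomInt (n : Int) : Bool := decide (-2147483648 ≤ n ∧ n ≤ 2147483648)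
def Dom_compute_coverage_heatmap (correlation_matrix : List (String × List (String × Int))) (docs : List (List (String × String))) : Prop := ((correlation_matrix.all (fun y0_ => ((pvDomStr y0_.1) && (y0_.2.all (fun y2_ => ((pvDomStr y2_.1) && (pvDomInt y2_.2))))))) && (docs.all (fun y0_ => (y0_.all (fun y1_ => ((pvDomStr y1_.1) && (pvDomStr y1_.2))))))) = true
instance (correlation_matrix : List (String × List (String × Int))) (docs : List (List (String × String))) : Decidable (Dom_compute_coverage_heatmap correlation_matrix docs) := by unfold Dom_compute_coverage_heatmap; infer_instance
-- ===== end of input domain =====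

-- B inverts the inner loop: doc ids are grouped by rank once and each theme's counts
-- come from probing its row for those ids, instead of scanning the row and looking up ranks
-- (objective: alternative; same asymptotic cost).


-- ===== PORT A =====
-- shared by both ports: the doc_rank-building loop is textually identical in Source A and Source B
def pvDocRank (docs : List (List (String × String))) : PySem.Dict String Int :=
  docs.foldl (fun dr d =>
    let did := (PySem.Dict.mk d).getD "id" ""
    let raw_rank := (PySem.Dict.mk d).getD "rank" ""
    match PySem.Int.ofStr? raw_rank with
    | some n => dr.insert did n
    | none => dr) PySem.Dict.empty

-- body of A's inner loop over a correlation row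
def pvStepA (doc_rank : PySem.Dict String Int) (rc : PySem.Dict Int Int) (q : String × Int) : PySem.Dict Int Int :=
  if q.2 > 0 then
    match doc_rank.get? q.1 with
    | some r => if rc.contains r then rc.modify r 0 (· + 1) else rc
    | none => rc
  else rc

def compute_coverage_heatmap (correlation_matrix : List (String × List (String × Int))) (docs : List (List (String × String))) : List (String × List (Int × Int)) :=
  if correlation_matrix = [] then []
  else
    let doc_rank := pvDocRank docs
    (correlation_matrix.foldl (fun (hm : PySem.Dict String (List (Int × Int))) p =>
      let rank_counts := p.2.foldl (pvStepA doc_rank)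
        (PySem.Dict.ofList ([(1, 0), (2, 0), (3, 0), (4, 0)] : List (Int × Int)))
      hm.insert p.1 rank_counts.items) PySem.Dict.empty).items

-- ===== PORT B =====
-- body of B's grouping loop over doc_rank.items()
def pvStepB (rd : PySem.Dict Int (List String)) (q : String × Int) : PySem.Dict Int (List String) :=
  if rd.contains q.2 then rd.modify q.2 [] (· ++ [q.1]) else rd

def compute_coverage_heatmap_alt (correlation_matrix : List (String × List (String × Int))) (docs : List (List (String × String))) : List (String × List (Int × Int)) :=
  if correlation_matrix = [] then []
  else
    let doc_rank := pvDocRank docs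
    let rank_docs := doc_rank.items.foldl pvStepB
      (PySem.Dict.ofList ([(1, []), (2, []), (3, []), (4, [])] : List (Int × List String)))
    (correlation_matrix.foldl (fun (hm : PySem.Dict String (List (Int × Int))) p =>
      hm.insert p.1 (rank_docs.items.map (fun rq =>
        (rq.1, (rq.2.countP (fun did => (PySem.Dict.mk p.2).getD did 0 > 0) : Int)))))
      PySem.Dict.empty).items

-- ===== PRECONDITION & SPEC =====
-- Pre_ excludes association lists in which some correlation row carries duplicate doc-id keys:
-- such lists do not represent any Python dict input (Python dict keys are unique), and on them
-- A's row scan would recount a doc id while B's first-match probe counts it once.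
def Pre_compute_coverage_heatmap (correlation_matrix : List (String × List (String × Int))) (docs : List (List (String × String))) : Prop :=
  ∀ p ∈ correlation_matrix, (p.2.map Prod.fst).Nodup
instance (correlation_matrix : List (String × List (String × Int))) (docs : List (List (String × String))) : Decidable (Pre_compute_coverage_heatmap correlation_matrix docs) := by unfold Pre_compute_coverage_heatmap; infer_instance
def pvWitness_compute_coverage_heatmap : (List (String × List (String × Int))) × (List (List (String × String))) :=
  ([("t", [("d", 1), ("e", 2)])], [[("id", "d"), ("rank", "1")], [("id", "e"), ("rank", "3")]])

def Spec_compute_coverage_heatmap (correlation_matrix : List (String × List (String × Int))) (docs : List (List (String × String))) (out : List (String × List (Int × Int))) : Prop := out = compute_coverage_heatmap_alt correlation_matrix docs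
instance (correlation_matrix : List (String × List (String × Int))) (docs : List (List (String × String))) (out : List (String × List (Int × Int))) : Decidable (Spec_compute_coverage_heatmap correlation_matrix docs out) := by unfold Spec_compute_coverage_heatmap; infer_instance

-- ===== CLAIM (what is proved, stated in full; the proofs are below) =====
def Claim_equal_compute_coverage_heatmap : Prop := ∀ (correlation_matrix : List (String × List (String × Int))) (docs : List (List (String × String))), Dom_compute_coverage_heatmap correlation_matrix docs → Pre_compute_coverage_heatmap correlation_matrix docs → Spec_compute_coverage_heatmap correlation_matrix docs (compute_coverage_heatmap correlation_matrix docs)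

-- ===== LEMMAS AND PROOFS =====

-- doc_rank's keys are unique (it is built by dict insertion)
theorem pvDocRank_nodup_aux (docs : List (List (String × String))) (d0 : PySem.Dict String Int)
    (h : d0.keys.Nodup) :
    (docs.foldl (fun dr d =>
      let did := (PySem.Dict.mk d).getD "id" ""
      let raw_rank := (PySem.Dict.mk d).getD "rank" ""
      match PySem.Int.ofStr? raw_rank with
      | some n => dr.insert did n
      | none => dr) d0).keys.Nodup := by
  induction docs generalizing d0 with
  | nil => exact h
  | cons d t ih =>
    simp only [List.foldl_cons]
    apply ih
    cases hm : PySem.Int.ofStr? ((PySem.Dict.mk d).getD "rank" "") with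
    | none => simpa [hm] using h
    | some n => simpa [hm] using PySem.Dict.nodup_keys_insert _ _ _ h

theorem pvDocRank_nodup (docs : List (List (String × String))) : (pvDocRank docs).keys.Nodup :=
  pvDocRank_nodup_aux docs PySem.Dict.empty (by simp [PySem.Dict.keys_empty])

-- pvStepA never changes the key list
theorem keys_pvStepA (dr : PySem.Dict String Int) (rc : PySem.Dict Int Int) (q : String × Int) :
    (pvStepA dr rc q).keys = rc.keys := by
  unfold pvStepA
  split_ifs
  · cases dr.get? q.1 with
    | none => rfl
    | some r =>
      dsimp only
      split_ifs with hc
      · rw [PySem.Dict.keys_modify, PySem.Dict.keys_insert_of_contains _ _ hc]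
      · rfl
  · rfl

theorem keys_foldl_pvStepA (dr : PySem.Dict String Int) (row : List (String × Int)) (rc : PySem.Dict Int Int) :
    (row.foldl (pvStepA dr) rc).keys = rc.keys := by
  induction row generalizing rc with
  | nil => rfl
  | cons q t ih => simp only [List.foldl_cons]; rw [ih, keys_pvStepA]

-- A's inner loop counts, per tracked rank r, the positive row entries whose doc has rank r
theorem getD_foldl_pvStepA (dr : PySem.Dict String Int) (row : List (String × Int))
    (rc : PySem.Dict Int Int) (hk : rc.keys = [1, 2, 3, 4]) (r : Int) (hr : r ∈ ([1, 2, 3, 4] : List Int)) :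
    (row.foldl (pvStepA dr) rc).getD r 0
      = rc.getD r 0 + (row.countP (fun q => decide (0 < q.2) && (dr.get? q.1 == some r)) : Int) := by
  induction row generalizing rc with
  | nil => simp
  | cons q t ih =>
    simp only [List.foldl_cons, List.countP_cons]
    have hk' : (pvStepA dr rc q).keys = [1, 2, 3, 4] := by rw [keys_pvStepA]; exact hk
    rw [ih _ hk']
    have hstep : (pvStepA dr rc q).getD r 0
        = rc.getD r 0 + (if (decide (0 < q.2) && (dr.get? q.1 == some r)) then (1 : Int) else 0) := by
      unfold pvStepA
      by_cases hq : q.2 > 0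
      · cases hg : dr.get? q.1 with
        | none => simp [hq]
        | some r' =>
          by_cases hrr : r' = r
          · subst hrr
            have hc : rc.contains r' = true := by
              rw [PySem.Dict.contains_iff_mem_keys, hk]; exact hr
            simp [hq, hc, PySem.Dict.getD_modify_self]
          · have hpred : (decide (0 < q.2) && ((some r' : Option Int) == some r)) = false := by
              simp [hrr]
            rw [hpred]
            simp only [hq, if_true, Bool.false_eq_true, if_false, add_zero]
            split_ifs with hc
            · exact PySem.Dict.getD_modify_of_ne _ _ _ (fun h => hrr h.symm)
            · rfl
      · simp [hq]
    rw [hstep]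
    push_cast
    split_ifs <;> ring

-- pvStepB never changes the key list
theorem keys_foldl_pvStepB (l : List (String × Int)) (rd : PySem.Dict Int (List String)) :
    (l.foldl pvStepB rd).keys = rd.keys := by
  induction l generalizing rd with
  | nil => rfl
  | cons q t ih =>
    simp only [List.foldl_cons]
    rw [ih]
    unfold pvStepB
    split_ifs with h
    · rw [PySem.Dict.keys_modify, PySem.Dict.keys_insert_of_contains _ _ h]
    · rfl

-- B's grouping loop collects, per tracked rank r, the doc ids of rank r in order
theorem getD_foldl_pvStepB (l : List (String × Int)) (rd : PySem.Dict Int (List String))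
    (hk : rd.keys = [1, 2, 3, 4]) (r : Int) (hr : r ∈ ([1, 2, 3, 4] : List Int)) :
    (l.foldl pvStepB rd).getD r []
      = rd.getD r [] ++ (l.filter (fun q => q.2 == r)).map Prod.fst := by
  induction l generalizing rd with
  | nil => simp
  | cons q t ih =>
    simp only [List.foldl_cons, List.filter_cons]
    have hk' : (pvStepB rd q).keys = [1, 2, 3, 4] := by
      unfold pvStepB
      split_ifs with h
      · rw [PySem.Dict.keys_modify, PySem.Dict.keys_insert_of_contains _ _ h]; exact hk
      · exact hk
    rw [ih _ hk']
    have hstep : (pvStepB rd q).getD r []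
        = rd.getD r [] ++ (if q.2 == r then [q.1] else []) := by
      unfold pvStepB
      by_cases hrr : q.2 = r
      · subst hrr
        have hc : rd.contains q.2 = true := by
          rw [PySem.Dict.contains_iff_mem_keys, hk]; exact hr
        simp [hc, PySem.Dict.getD_modify_self]
      · have hpred : (q.2 == r) = false := by simp [hrr]
        rw [hpred]
        simp only [Bool.false_eq_true, if_false, List.append_nil]
        split_ifs with hc
        · exact PySem.Dict.getD_modify_of_ne _ _ _ (fun h => hrr h.symm)
        · rfl
    rw [hstep]
    by_cases hrr : q.2 = r <;> simp [hrr]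

-- counting helper: splitting a countP over an assoc list with unique keys at one key k,
-- when the predicate is false on every entry keyed k
theorem countP_key_update {γ : Type} (l2 : List (String × γ)) (h2 : (l2.map Prod.fst).Nodup)
    (k : String) (f : γ → Bool) (p : String × γ → Bool) (hp : ∀ w, p (k, w) = false) :
    l2.countP (fun q => if q.1 = k then f q.2 else p q)
      = l2.countP p + (if ((PySem.Dict.mk l2).get? k).any f then 1 else 0) := by
  induction l2 with
  | nil => simp [PySem.Dict.get?]
  | cons a t ih =>
    obtain ⟨k2, w⟩ := a
    simp only [List.map_cons, List.nodup_cons, List.mem_map] at h2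
    obtain ⟨hk2t, ht⟩ := h2
    simp only [List.countP_cons, PySem.Dict.get?_mk_cons]
    by_cases hk2 : k2 = k
    · subst hk2
      have htail : t.countP (fun q => if q.1 = k2 then f q.2 else p q) = t.countP p := by
        apply List.countP_congr
        intro x hx
        have : x.1 ≠ k2 := fun h => hk2t ⟨x, hx, h⟩
        simp [this]
      simp [htail, hp w]
    · have hne : (k2 == k) = false := by simp [hk2]
      rw [hne]
      simp only [Bool.false_eq_true, if_false]
      rw [ih ht]
      simp only [hk2, if_false]
      omega

-- the central symmetry: counting row entries against doc_rank equals counting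
-- doc_rank entries against the row, when both key lists are unique
theorem countP_swap {β γ : Type} (l1 : List (String × β)) (l2 : List (String × γ))
    (h1 : (l1.map Prod.fst).Nodup) (h2 : (l2.map Prod.fst).Nodup) (P : β → Bool) (Q : γ → Bool) :
    l1.countP (fun q => P q.2 && ((PySem.Dict.mk l2).get? q.1).any Q)
      = l2.countP (fun q => Q q.2 && ((PySem.Dict.mk l1).get? q.1).any P) := by
  induction l1 with
  | nil =>
    simp [PySem.Dict.get?]
  | cons a t ih =>
    obtain ⟨k, v⟩ := a
    simp only [List.map_cons, List.nodup_cons, List.mem_map] at h1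
    obtain ⟨hkt, ht⟩ := h1
    have hknone : (PySem.Dict.mk t).get? k = none := by
      rw [PySem.Dict.get?_eq_none_iff_not_mem_keys]
      simp only [PySem.Dict.keys]
      exact fun hm => by
        obtain ⟨x, hx, hxk⟩ := List.mem_map.mp hm
        exact hkt ⟨x, hx, hxk⟩
    -- rewrite the right-hand predicate into key-update form
    have hpred : l2.countP (fun q => Q q.2 && ((PySem.Dict.mk ((k, v) :: t)).get? q.1).any P)
        = l2.countP (fun q => if q.1 = k then (Q q.2 && P v) else (Q q.2 && ((PySem.Dict.mk t).get? q.1).any P)) := by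
      apply List.countP_congr
      intro q _
      rw [PySem.Dict.get?_mk_cons]
      by_cases hq : q.1 = k
      · have : (k == q.1) = true := by simp [hq]
        simp [hq, Option.any]
      · have : (k == q.1) = false := by simp; exact fun h => hq h.symm
        simp [this, hq]
    rw [hpred, countP_key_update l2 h2 k (fun w => Q w && P v)
      (fun q => Q q.2 && ((PySem.Dict.mk t).get? q.1).any P)
      (fun w => by simp [hknone, Option.any])]
    rw [← ih ht]
    simp only [List.countP_cons]
    have hif : (if (P v && ((PySem.Dict.mk l2).get? k).any Q) then 1 else 0)
        = (if ((PySem.Dict.mk l2).get? k).any (fun w => Q w && P v) then 1 else 0) := by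
      cases hg : (PySem.Dict.mk l2).get? k with
      | none => simp [Option.any]
      | some w => simp [Option.any, Bool.and_comm]
    omega

-- bridging: Python's `x == some r` test as an Option.any, and `getD … 0 > 0` as an Option.any
theorem beq_some_eq_any (o : Option Int) (r : Int) : (o == some r) = o.any (fun w => w == r) := by
  cases o <;> simp [Option.any]

theorem getD_pos_eq_any (row : List (String × Int)) (x : String) :
    (decide (0 < (PySem.Dict.mk row).getD x 0)) = ((PySem.Dict.mk row).get? x).any (fun c => decide (0 < c)) := by
  rw [PySem.Dict.getD_eq_get?_getD]
  cases (PySem.Dict.mk row).get? x <;> simp [Option.any]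

-- the per-rank counts agree
theorem count_agree (dr : PySem.Dict String Int) (hdr : (dr.items.map Prod.fst).Nodup)
    (row : List (String × Int)) (hrow : (row.map Prod.fst).Nodup) (r : Int) :
    row.countP (fun q => decide (0 < q.2) && (dr.get? q.1 == some r))
      = ((dr.items.filter (fun q => q.2 == r)).map Prod.fst).countP
          (fun did => (PySem.Dict.mk row).getD did 0 > 0) := by
  rw [List.countP_map, List.countP_filter]
  have h1 : row.countP (fun q => decide (0 < q.2) && (dr.get? q.1 == some r))
      = row.countP (fun q => decide (0 < q.2) && ((PySem.Dict.mk dr.items).get? q.1).any (fun w => w == r)) := by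
    apply List.countP_congr
    intro q _
    rw [show (PySem.Dict.mk dr.items) = dr from rfl, beq_some_eq_any]
  rw [h1, countP_swap row dr.items hrow hdr (fun c => decide (0 < c)) (fun w => w == r)]
  apply List.countP_congr
  intro q _
  simp only [Function.comp]
  rw [← getD_pos_eq_any, Bool.and_comm]

-- per-row agreement of the two inner computations
theorem row_agree (docs : List (List (String × String))) (row : List (String × Int))
    (hrow : (row.map Prod.fst).Nodup) :
    (row.foldl (pvStepA (pvDocRank docs))
        (PySem.Dict.ofList ([(1, 0), (2, 0), (3, 0), (4, 0)] : List (Int × Int)))).items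
      = ((pvDocRank docs).items.foldl pvStepB
          (PySem.Dict.ofList ([(1, []), (2, []), (3, []), (4, [])] : List (Int × List String)))).items.map
          (fun rq => (rq.1, (rq.2.countP (fun did => (PySem.Dict.mk row).getD did 0 > 0) : Int))) := by
  have hdr : (pvDocRank docs).keys.Nodup := pvDocRank_nodup docs
  have hdr' : ((pvDocRank docs).items.map Prod.fst).Nodup := by
    simpa only [PySem.Dict.keys] using hdr
  have hkinitA : (PySem.Dict.ofList ([(1, 0), (2, 0), (3, 0), (4, 0)] : List (Int × Int))).keys = [1, 2, 3, 4] := by decide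
  have hkinitB : (PySem.Dict.ofList ([(1, []), (2, []), (3, []), (4, [])] : List (Int × List String))).keys = [1, 2, 3, 4] := by decide
  have hginitA : ∀ r ∈ ([1, 2, 3, 4] : List Int), (PySem.Dict.ofList ([(1, 0), (2, 0), (3, 0), (4, 0)] : List (Int × Int))).getD r 0 = 0 := by decide
  have hginitB : ∀ r ∈ ([1, 2, 3, 4] : List Int), (PySem.Dict.ofList ([(1, []), (2, []), (3, []), (4, [])] : List (Int × List String))).getD r [] = [] := by decide
  have hkA : (row.foldl (pvStepA (pvDocRank docs))
      (PySem.Dict.ofList ([(1, 0), (2, 0), (3, 0), (4, 0)] : List (Int × Int)))).keys = [1, 2, 3, 4] := by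
    rw [keys_foldl_pvStepA, hkinitA]
  have hkB : ((pvDocRank docs).items.foldl pvStepB
      (PySem.Dict.ofList ([(1, []), (2, []), (3, []), (4, [])] : List (Int × List String)))).keys = [1, 2, 3, 4] := by
    rw [keys_foldl_pvStepB, hkinitB]
  rw [PySem.Dict.items_eq_map_keys _ (by rw [hkA]; decide) 0,
      PySem.Dict.items_eq_map_keys _ (by rw [hkB]; decide) [], hkA, hkB, List.map_map]
  apply List.map_congr_left
  intro r hr
  simp only [Function.comp]
  refine Prod.ext rfl ?_
  rw [getD_foldl_pvStepA _ _ _ hkinitA r hr, hginitA r hr,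
      getD_foldl_pvStepB _ _ hkinitB r hr, hginitB r hr]
  simp only [List.nil_append, zero_add]
  exact congrArg Nat.cast (count_agree (pvDocRank docs) hdr' row hrow r)

-- ===== VERDICT (by name: the statement is the Claim_ definition above) =====
theorem compute_coverage_heatmap_spec : Claim_equal_compute_coverage_heatmap := by
  intro correlation_matrix docs _ hpre
  unfold Spec_compute_coverage_heatmap compute_coverage_heatmap compute_coverage_heatmap_alt
  by_cases hcm : correlation_matrix = []
  · simp [hcm]
  · simp only [if_neg hcm]
    apply congrArg PySem.Dict.items
    apply PySem.List.foldl_congr_mem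
    intro acc p hp
    rw [row_agree docs p.2 (hpre p hp)]
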